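-- pv_equiv track=rewrite | github.com/atib92/leetcode | find-x-value-of-array-i.py | resultArray_v1
-- ===== SOURCE A (Python) =====
-- from typing import List
--
-- def resultArray_v1(nums: List[int], k: int) -> List[int]:
--     """
--     Brute Force : We fina out all subarrays from nums[i:j] and keep stores its product in dp[i][j].
--     Problems:
--     1. The multiplication result can become huge and cause overflow
--     2. Since n can be 10^5, O(N^2) woudl anyways not work at scale.
--     HENCE THIS ALGORITHM FAILS TO PASS ALL TEST CASES
--     """
--     out = [0] * k
--     N = len(nums)
--     dp = [[1] * N for _ in range(N)]
--     for i in range(N):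
--         for j in range(i, N):
--             if j == i:
--                 dp[i][i] = nums[i]
--             else:
--                 dp[i][j] = dp[i][j-1] * nums[j]
--             x = dp[i][j] % k
--             out[x] += 1
--     return out
-- ===== SOURCE B (Python) =====
-- from typing import List
--
-- def resultArray_v1(nums: List[int], k: int) -> List[int]:
--     # Rolling remainders: for each position, keep the list of products-mod-k of all
--     # subarrays ending there; no dp table, no unbounded big-integer products.
--     out = [0] * k
--     ends = []  # remainders mod k of subarray products ending at the previous index
--     for v in nums:
--         ends = [r * v % k for r in ends]
--         ends.append(v % k)
--         for r in ends:
--             out[r] += 1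
--     return out
-- ===== Notes on version B (the rewrite author's own statement) =====
-- stated objective: faster
-- what changed: Replaces A's N x N table of full (unbounded) subarray products with a single pass over nums that keeps, per end index, the list of subarray products already reduced mod k, bucketing as it goes.
import Mathlib
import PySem

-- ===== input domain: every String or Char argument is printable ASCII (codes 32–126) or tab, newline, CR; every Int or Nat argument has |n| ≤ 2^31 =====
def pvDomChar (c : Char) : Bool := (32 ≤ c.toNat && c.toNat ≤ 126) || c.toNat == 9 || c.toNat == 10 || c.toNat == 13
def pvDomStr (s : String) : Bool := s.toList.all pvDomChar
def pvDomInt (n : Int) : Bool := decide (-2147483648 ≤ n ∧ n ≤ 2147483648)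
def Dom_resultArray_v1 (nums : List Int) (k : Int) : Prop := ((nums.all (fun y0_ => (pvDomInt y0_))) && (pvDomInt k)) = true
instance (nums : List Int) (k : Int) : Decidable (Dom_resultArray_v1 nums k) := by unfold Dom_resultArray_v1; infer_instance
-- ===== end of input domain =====

-- B replaces A's N×N table of unbounded subarray products with one pass keeping, per end
-- index, the list of subarray products reduced mod k; same return value on all of Pre_.

-- ===== PORT A =====
-- out[x] += 1 (shared statement in both Pythons, ported once; a Python list is an array:
-- O(1) indexed update; exact for 0 <= x < len(out), the only indices reachable inside Pre_)
def pvBump (out : Array Int) (x : Int) : Array Int :=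
  out.setIfInBounds x.toNat (out.getD x.toNat 0 + 1)

-- dp[i][j] read / dp[i][j] = v (indices are loop counters, always 0 <= i,j < len)
def pvGet2 (dp : Array (Array Int)) (i j : Int) : Int :=
  (dp.getD i.toNat #[]).getD j.toNat 1

def pvSet2 (dp : Array (Array Int)) (i j : Int) (v : Int) : Array (Array Int) :=
  dp.setIfInBounds i.toNat ((dp.getD i.toNat #[]).setIfInBounds j.toNat v)

def resultArray_v1 (nums : List Int) (k : Int) : List Int :=
  let N : Int := PySem.List.len nums
  let st :=
    (PySem.List.pyRange 0 N 1).foldl (fun (st : Array Int × Array (Array Int)) i =>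
      (PySem.List.pyRange i N 1).foldl (fun (st : Array Int × Array (Array Int)) j =>
        let dp := if j == i then pvSet2 st.2 i i (PySem.List.pyGetD nums i 0)
                  else pvSet2 st.2 i j (pvGet2 st.2 i (j-1) * PySem.List.pyGetD nums j 0)
        let x := PySem.Int.mod (pvGet2 dp i j) k
        (pvBump st.1 x, dp)) st)
      (Array.replicate k.toNat 0, Array.replicate nums.length (Array.replicate nums.length 1))
  st.1.toList

-- ===== PORT B =====
def resultArray_v1_alt (nums : List Int) (k : Int) : List Int :=
  let st := nums.foldl (fun (st : Array Int × List Int) v =>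
      let ends := st.2.map (fun r => PySem.Int.mod (r * v) k) ++ [PySem.Int.mod v k]
      (ends.foldl pvBump st.1, ends))
    (Array.replicate k.toNat 0, ([] : List Int))
  st.1.toList

-- ===== PRECONDITION & SPEC =====
-- Pre_ excludes exactly the inputs where A raises: k = 0 with nonempty nums (ZeroDivisionError
-- at `% k`), k < 0 with nonempty nums (IndexError: out is [] and x is a negative index).
def Pre_resultArray_v1 (nums : List Int) (k : Int) : Prop := 1 ≤ k ∨ nums = []
instance (nums : List Int) (k : Int) : Decidable (Pre_resultArray_v1 nums k) := by
  unfold Pre_resultArray_v1; infer_instance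

def pvWitness_resultArray_v1 : List Int × Int := ([3, -2, 5], 4)

def Spec_resultArray_v1 (nums : List Int) (k : Int) (out : List Int) : Prop := out = resultArray_v1_alt nums k
instance (nums : List Int) (k : Int) (out : List Int) : Decidable (Spec_resultArray_v1 nums k out) := by unfold Spec_resultArray_v1; infer_instance

-- ===== CLAIM (what is proved, stated in full; the proofs are below) =====
def Claim_equal_resultArray_v1 : Prop := ∀ (nums : List Int) (k : Int), Dom_resultArray_v1 nums k → Pre_resultArray_v1 nums k → Spec_resultArray_v1 nums k (resultArray_v1 nums k)

-- ===== LEMMAS AND PROOFS =====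


-- List-level shadows of the ports' array operations (the proofs run on these; the
-- bridge lemmas below connect them to the ports)
def pvBumpL (out : List Int) (x : Int) : List Int :=
  PySem.List.pySetD out x (PySem.List.pyGetD out x 0 + 1)

def pvGet2L (dp : List (List Int)) (i j : Int) : Int :=
  PySem.List.pyGetD (PySem.List.pyGetD dp i []) j 1

def pvSet2L (dp : List (List Int)) (i j : Int) (v : Int) : List (List Int) :=
  PySem.List.pySetD dp i (PySem.List.pySetD (PySem.List.pyGetD dp i []) j v)

-- the loop bodies of the two ports at list level (the proofs analyse these)
def pvBodyA (nums : List Int) (k i : Int) (st : List Int × List (List Int)) (j : Int) :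
    List Int × List (List Int) :=
  let dp := if j == i then pvSet2L st.2 i i (PySem.List.pyGetD nums i 0)
            else pvSet2L st.2 i j (pvGet2L st.2 i (j-1) * PySem.List.pyGetD nums j 0)
  let x := PySem.Int.mod (pvGet2L dp i j) k
  (pvBumpL st.1 x, dp)

def pvBodyB (k : Int) (st : List Int × List Int) (v : Int) : List Int × List Int :=
  let ends := st.2.map (fun r => PySem.Int.mod (r * v) k) ++ [PySem.Int.mod v k]
  (ends.foldl pvBumpL st.1, ends)

-- the ports, unfolded to folds of the named array-level bodies (definitional)
def pvBodyAArr (nums : List Int) (k i : Int) (st : Array Int × Array (Array Int)) (j : Int) :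
    Array Int × Array (Array Int) :=
  let dp := if j == i then pvSet2 st.2 i i (PySem.List.pyGetD nums i 0)
            else pvSet2 st.2 i j (pvGet2 st.2 i (j-1) * PySem.List.pyGetD nums j 0)
  let x := PySem.Int.mod (pvGet2 dp i j) k
  (pvBump st.1 x, dp)

def pvBodyBArr (k : Int) (st : Array Int × List Int) (v : Int) : Array Int × List Int :=
  let ends := st.2.map (fun r => PySem.Int.mod (r * v) k) ++ [PySem.Int.mod v k]
  (ends.foldl pvBump st.1, ends)

lemma pvA_unfoldArr (nums : List Int) (k : Int) :
    resultArray_v1 nums k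
      = ((PySem.List.pyRange 0 (PySem.List.len nums) 1).foldl
          (fun st i => (PySem.List.pyRange i (PySem.List.len nums) 1).foldl (pvBodyAArr nums k i) st)
          (Array.replicate k.toNat 0,
           Array.replicate nums.length (Array.replicate nums.length 1))).1.toList := rfl

lemma pvB_unfoldArr (nums : List Int) (k : Int) :
    resultArray_v1_alt nums k
      = (nums.foldl (pvBodyBArr k) (Array.replicate k.toNat 0, ([] : List Int))).1.toList := rfl

-- product of nums[i..e-1]
def pvP (nums : List Int) (i e : Nat) : Int := ((nums.drop i).take (e - i)).prod

-- remainder bucket of the subarray nums[i..e-1]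
def pvRem (nums : List Int) (k : Int) (p : Nat × Nat) : Int := PySem.Int.mod (pvP nums p.1 p.2) k

-- index pairs (i, e), i < e ≤ n : A's order (by start) and B's order (by end)
def pvPairsA (n : Nat) : List (Nat × Nat) :=
  (List.range n).flatMap (fun i => (List.range' (i+1) (n-i)).map (fun e => (i, e)))
def pvPairsB (n : Nat) : List (Nat × Nat) :=
  (List.range n).flatMap (fun m => (List.range (m+1)).map (fun i => (i, m+1)))

-- Nat-index bump (pvBumpL at a nonnegative index)
def pvBumpN (out : List Int) (n : Nat) : List Int := out.set n (out.getD n 0 + 1)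

lemma pvBumpL_nonneg (out : List Int) (x : Int) (hx : 0 ≤ x) :
    pvBumpL out x = pvBumpN out x.toNat := by
  obtain ⟨n, rfl⟩ := Int.eq_ofNat_of_zero_le hx
  simp [pvBumpL, pvBumpN]

lemma pvBumpN_comm (out : List Int) (n m : Nat) :
    pvBumpN (pvBumpN out n) m = pvBumpN (pvBumpN out m) n := by
  rcases eq_or_ne n m with rfl | h
  · rfl
  · simp only [pvBumpN, List.getD_eq_getElem?_getD, List.getElem?_set_ne h,
      List.getElem?_set_ne (Ne.symm h)]
    rw [List.set_comm _ _ h]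

lemma pvBumpL_comm (out : List Int) (x y : Int) (hx : 0 ≤ x) (hy : 0 ≤ y) :
    pvBumpL (pvBumpL out x) y = pvBumpL (pvBumpL out y) x := by
  rw [pvBumpL_nonneg _ _ hx, pvBumpL_nonneg _ _ hy, pvBumpL_nonneg _ _ hy,
      pvBumpL_nonneg _ _ hx, pvBumpN_comm]

-- pvP: extend the subarray by one element on the right
lemma pvP_succ (nums : List Int) (i e : Nat) (hie : i ≤ e) (he : e < nums.length) :
    pvP nums i (e+1) = pvP nums i e * nums[e] := by
  unfold pvP
  have h1 : e + 1 - i = (e - i) + 1 := by omega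
  have h2 : e - i < (nums.drop i).length := by simp; omega
  rw [h1, List.prod_take_succ _ _ h2]
  congr 1
  rw [List.getElem_drop]
  congr 1; omega

lemma pvP_self (nums : List Int) (i : Nat) : pvP nums i i = 1 := by simp [pvP]

lemma pvP_single (nums : List Int) (i : Nat) (hi : i < nums.length) :
    pvP nums i (i+1) = nums[i] := by
  rw [pvP_succ nums i i le_rfl hi, pvP_self, one_mul]

-- well-formedness of A's dp table: a square table of side n
def pvWf (n : Nat) (dp : List (List Int)) : Prop :=
  dp.length = n ∧ ∀ row ∈ dp, row.length = n

lemma pvWf_init (n : Nat) : pvWf n (List.replicate n (List.replicate n (1 : Int))) := by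
  constructor
  · simp
  · intro row hr
    rw [List.eq_of_mem_replicate hr]; simp

lemma pvGet2L_pvSet2L_self (dp : List (List Int)) (i j : Int) (v : Int) (n : Nat)
    (hwf : pvWf n dp) (hi0 : 0 ≤ i) (hj0 : 0 ≤ j) (hi : i.toNat < n) (hj : j.toNat < n) :
    pvGet2L (pvSet2L dp i j v) i j = v := by
  obtain ⟨a, rfl⟩ := Int.eq_ofNat_of_zero_le hi0
  obtain ⟨b, rfl⟩ := Int.eq_ofNat_of_zero_le hj0
  obtain ⟨hlen, hrow⟩ := hwf
  simp only [Int.toNat_natCast] at hi hj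
  have ha : a < dp.length := by omega
  have hrl : (dp[a]?.getD ([] : List Int)).length = n := by
    rw [List.getElem?_eq_getElem ha, Option.getD_some]
    exact hrow _ (List.getElem_mem ha)
  simp only [pvGet2L, pvSet2L, PySem.List.pySetD_natCast, PySem.List.pyGetD_natCast,
    List.getD_eq_getElem?_getD]
  rw [List.getElem?_set_self ha, Option.getD_some,
      List.getElem?_set_self (by omega), Option.getD_some]

lemma pvWf_pvSet2L (dp : List (List Int)) (i j : Int) (v : Int) (n : Nat)
    (hwf : pvWf n dp) (hi0 : 0 ≤ i) : pvWf n (pvSet2L dp i j v) := by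
  obtain ⟨a, rfl⟩ := Int.eq_ofNat_of_zero_le hi0
  obtain ⟨hlen, hrow⟩ := hwf
  simp only [pvSet2L, PySem.List.pySetD_natCast]
  refine ⟨by simpa using hlen, ?_⟩
  intro row hr
  rcases List.mem_or_eq_of_mem_set hr with h | rfl
  · exact hrow _ h
  · by_cases ha : a < dp.length
    · rw [PySem.List.length_pySetD, PySem.List.pyGetD_natCast,
        List.getD_eq_getElem?_getD, List.getElem?_eq_getElem ha, Option.getD_some]
      exact hrow _ (List.getElem_mem ha)
    · exact hrow _ (by rwa [List.set_eq_of_length_le (by omega)] at hr)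

-- A's inner loop (fixed i), fold over j ∈ range(j0, N)
lemma pvInnerA (nums : List Int) (k : Int) (i : Int) (c : Nat) :
    ∀ (j : Int) (out : List Int) (dp : List (List Int)),
    0 ≤ i → i ≤ j → j + c = (nums.length : Int) → pvWf nums.length dp →
    (i < j → pvGet2L dp i (j-1) = pvP nums i.toNat j.toNat) →
    ((PySem.List.pyRange j (PySem.List.len nums) 1).foldl (pvBodyA nums k i) (out, dp)).1
      = ((List.range' (j.toNat + 1) c).map (fun e => pvRem nums k (i.toNat, e))).foldl pvBumpL out
    ∧ pvWf nums.length
        ((PySem.List.pyRange j (PySem.List.len nums) 1).foldl (pvBodyA nums k i) (out, dp)).2 := by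
  induction c with
  | zero =>
    intro j out dp hi0 hij hjc hwf _
    rw [PySem.List.len_eq, PySem.List.pyRange_one_eq_nil (by omega)]
    simpa using hwf
  | succ c ih =>
    intro j out dp hi0 hij hjc hwf hprev
    have hjN : j < (nums.length : Int) := by omega
    have hj0 : 0 ≤ j := le_trans hi0 hij
    have hiN : i.toNat < nums.length := by omega
    have hjN' : j.toNat < nums.length := by omega
    rw [PySem.List.len_eq, PySem.List.pyRange_one_cons (by omega), List.foldl_cons,
        ← PySem.List.len_eq]
    by_cases hji : j = i
    · subst hji
      have hvj : PySem.List.pyGetD nums j 0 = pvP nums j.toNat (j.toNat + 1) := by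
        rw [PySem.List.pyGetD_eq_getElem nums 0 hj0 (by exact_mod_cast hjN),
            pvP_single nums j.toNat hjN']
      have hget : pvGet2L (pvSet2L dp j j (PySem.List.pyGetD nums j 0)) j j
          = PySem.List.pyGetD nums j 0 :=
        pvGet2L_pvSet2L_self dp j j _ nums.length hwf hj0 hj0 hjN' hjN'
      have hbody : pvBodyA nums k j (out, dp) j
          = (pvBumpL out (PySem.Int.mod (pvP nums j.toNat (j.toNat + 1)) k),
             pvSet2L dp j j (PySem.List.pyGetD nums j 0)) := by
        simp only [pvBodyA, BEq.rfl, if_true]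
        rw [hget, hvj]
      rw [hbody]
      have hwf' := pvWf_pvSet2L dp j j (PySem.List.pyGetD nums j 0) nums.length hwf hj0
      have hprev' : j < j + 1 → pvGet2L (pvSet2L dp j j (PySem.List.pyGetD nums j 0)) j (j+1-1)
          = pvP nums j.toNat (j+1).toNat := by
        intro _
        rw [show j + 1 - 1 = j by ring, hget, hvj, show (j+1).toNat = j.toNat + 1 by omega]
      obtain ⟨h1, h2⟩ := ih (j+1)
        (pvBumpL out (PySem.Int.mod (pvP nums j.toNat (j.toNat + 1)) k))
        (pvSet2L dp j j (PySem.List.pyGetD nums j 0)) hi0 (by omega) (by omega) hwf' hprev'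
      rw [show (j+1).toNat = j.toNat + 1 by omega] at h1
      refine ⟨?_, h2⟩
      rw [List.range'_succ, List.map_cons, List.foldl_cons]
      exact h1
    · have hij' : i < j := lt_of_le_of_ne hij (fun h => hji h.symm)
      have hval : pvGet2L dp i (j-1) * PySem.List.pyGetD nums j 0
          = pvP nums i.toNat (j.toNat + 1) := by
        rw [hprev hij', PySem.List.pyGetD_eq_getElem nums 0 hj0 (by exact_mod_cast hjN),
            ← pvP_succ nums i.toNat j.toNat (by omega) hjN']
      have hget : pvGet2L (pvSet2L dp i j (pvP nums i.toNat (j.toNat + 1))) i j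
          = pvP nums i.toNat (j.toNat + 1) :=
        pvGet2L_pvSet2L_self dp i j _ nums.length hwf hi0 hj0 hiN hjN'
      have hbeq : (j == i) = false := by simp [hji]
      have hbody : pvBodyA nums k i (out, dp) j
          = (pvBumpL out (PySem.Int.mod (pvP nums i.toNat (j.toNat + 1)) k),
             pvSet2L dp i j (pvP nums i.toNat (j.toNat + 1))) := by
        simp only [pvBodyA, hbeq, Bool.false_eq_true, if_false]
        rw [hval, hget]
      rw [hbody]
      have hwf' := pvWf_pvSet2L dp i j (pvP nums i.toNat (j.toNat + 1)) nums.length hwf hi0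
      have hprev' : i < j + 1 →
          pvGet2L (pvSet2L dp i j (pvP nums i.toNat (j.toNat + 1))) i (j+1-1)
            = pvP nums i.toNat (j+1).toNat := by
        intro _
        rw [show j + 1 - 1 = j by ring, hget, show (j+1).toNat = j.toNat + 1 by omega]
      obtain ⟨h1, h2⟩ := ih (j+1)
        (pvBumpL out (PySem.Int.mod (pvP nums i.toNat (j.toNat + 1)) k))
        (pvSet2L dp i j (pvP nums i.toNat (j.toNat + 1))) hi0 (by omega) (by omega) hwf' hprev'
      rw [show (j+1).toNat = j.toNat + 1 by omega] at h1
      refine ⟨?_, h2⟩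
      rw [List.range'_succ, List.map_cons, List.foldl_cons]
      exact h1

-- A's outer loop
lemma pvOuterA (nums : List Int) (k : Int) (c : Nat) :
    ∀ (i : Int) (out : List Int) (dp : List (List Int)),
    0 ≤ i → i + c = (nums.length : Int) → pvWf nums.length dp →
    ((PySem.List.pyRange i (PySem.List.len nums) 1).foldl
        (fun st i => (PySem.List.pyRange i (PySem.List.len nums) 1).foldl (pvBodyA nums k i) st)
        (out, dp)).1
      = ((List.range' i.toNat c).flatMap
          (fun i => (List.range' (i+1) (nums.length - i)).map (fun e => pvRem nums k (i, e)))).foldl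
          pvBumpL out := by
  induction c with
  | zero =>
    intro i out dp hi0 hic hwf
    rw [PySem.List.len_eq, PySem.List.pyRange_one_eq_nil (by omega)]
    simp
  | succ c ih =>
    intro i out dp hi0 hic hwf
    rw [PySem.List.len_eq, PySem.List.pyRange_one_cons (by omega), List.foldl_cons,
        ← PySem.List.len_eq]
    obtain ⟨h1, h2⟩ := pvInnerA nums k i (c+1) i out dp hi0 le_rfl (by omega) hwf
      (fun h => absurd h (lt_irrefl i))
    have hstep := ih (i+1) ((PySem.List.pyRange i (PySem.List.len nums) 1).foldl
        (pvBodyA nums k i) (out, dp)).1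
      ((PySem.List.pyRange i (PySem.List.len nums) 1).foldl (pvBodyA nums k i) (out, dp)).2
      (by omega) (by omega) h2
    rw [List.range'_succ, List.flatMap_cons, List.foldl_append,
        show nums.length - i.toNat = c + 1 by omega, ← h1]
    rw [show (i+1).toNat = i.toNat + 1 by omega] at hstep
    simp only [Prod.mk.eta] at hstep
    exact hstep

-- ---- bridges: the ports' array state projected to the list-level state ----
lemma pvArrGetD (a : Array Int) (n : Nat) (d : Int) : a.getD n d = a.toList.getD n d := by
  unfold Array.getD
  split <;> simp_all [List.getD_eq_getElem?_getD]

lemma pvArrRow (dp : Array (Array Int)) (n : Nat) :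
    (dp.toList.map Array.toList).getD n [] = (dp.getD n #[]).toList := by
  by_cases h : n < dp.size
  · have h' : n < (dp.toList.map Array.toList).length := by simpa using h
    rw [List.getD_eq_getElem _ _ h', List.getElem_map]
    simp [Array.getD, h]
  · rw [List.getD_eq_default _ _ (by simpa using Nat.le_of_not_lt h)]
    simp [Array.getD, h]

lemma pvBump_bridge (a : Array Int) (x : Int) (hx : 0 ≤ x) :
    (pvBump a x).toList = pvBumpL a.toList x := by
  rw [pvBumpL_nonneg _ _ hx]
  unfold pvBump pvBumpN
  rw [Array.toList_setIfInBounds, pvArrGetD]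

lemma pvGet2_bridge (dp : Array (Array Int)) (i j : Int) (hi : 0 ≤ i) (hj : 0 ≤ j) :
    pvGet2L (dp.toList.map Array.toList) i j = pvGet2 dp i j := by
  obtain ⟨a, rfl⟩ := Int.eq_ofNat_of_zero_le hi
  obtain ⟨b, rfl⟩ := Int.eq_ofNat_of_zero_le hj
  simp only [pvGet2L, pvGet2, PySem.List.pyGetD_natCast, Int.toNat_natCast]
  rw [pvArrRow, ← pvArrGetD]

lemma pvSet2_bridge (dp : Array (Array Int)) (i j : Int) (v : Int) (hi : 0 ≤ i) (hj : 0 ≤ j) :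
    (pvSet2 dp i j v).toList.map Array.toList
      = pvSet2L (dp.toList.map Array.toList) i j v := by
  obtain ⟨a, rfl⟩ := Int.eq_ofNat_of_zero_le hi
  obtain ⟨b, rfl⟩ := Int.eq_ofNat_of_zero_le hj
  simp only [pvSet2L, pvSet2, PySem.List.pySetD_natCast, PySem.List.pyGetD_natCast,
    Int.toNat_natCast]
  rw [Array.toList_setIfInBounds, List.map_set, Array.toList_setIfInBounds, pvArrRow]

lemma pvBodyA_bridge (nums : List Int) (k i j : Int) (st : Array Int × Array (Array Int))
    (hk : 1 ≤ k) (hi : 0 ≤ i) (hij : i ≤ j) :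
    ((pvBodyAArr nums k i st j).1.toList,
     (pvBodyAArr nums k i st j).2.toList.map Array.toList)
      = pvBodyA nums k i (st.1.toList, st.2.toList.map Array.toList) j := by
  have hj : 0 ≤ j := le_trans hi hij
  by_cases hji : j = i
  · subst hji
    simp only [pvBodyAArr, pvBodyA, BEq.rfl, if_true]
    rw [← pvSet2_bridge st.2 j j (PySem.List.pyGetD nums j 0) hj hj,
        pvGet2_bridge _ _ _ hj hj,
        pvBump_bridge _ _ (PySem.Int.mod_nonneg _ (by omega))]
  · have hbeq : (j == i) = false := by simp [hji]
    have hj1 : (0:Int) ≤ j - 1 := by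
      rcases lt_of_le_of_ne hij (fun h => hji h.symm) with h
      omega
    simp only [pvBodyAArr, pvBodyA, hbeq, Bool.false_eq_true, if_false]
    rw [pvGet2_bridge st.2 i (j-1) hi hj1,
        ← pvSet2_bridge st.2 i j _ hi hj,
        pvGet2_bridge _ i j hi hj,
        pvBump_bridge _ _ (PySem.Int.mod_nonneg _ (by omega))]

lemma pvInner_bridge (nums : List Int) (k i : Int) (hk : 1 ≤ k) (hi : 0 ≤ i) :
    ∀ (l : List Int), (∀ j ∈ l, i ≤ j) → ∀ (st : Array Int × Array (Array Int)),
    ((l.foldl (pvBodyAArr nums k i) st).1.toList,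
     (l.foldl (pvBodyAArr nums k i) st).2.toList.map Array.toList)
      = l.foldl (pvBodyA nums k i) (st.1.toList, st.2.toList.map Array.toList) := by
  intro l
  induction l with
  | nil => intro _ st; rfl
  | cons j l ih =>
    intro hl st
    rw [List.foldl_cons, List.foldl_cons,
        ← pvBodyA_bridge nums k i j st hk hi (hl j (List.mem_cons_self ..))]
    exact ih (fun x hx => hl x (List.mem_cons_of_mem _ hx)) _

lemma pvOuter_bridge (nums : List Int) (k : Int) (hk : 1 ≤ k) :
    ∀ (l : List Int), (∀ i ∈ l, 0 ≤ i) → ∀ (st : Array Int × Array (Array Int)),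
    ((l.foldl (fun st i =>
        (PySem.List.pyRange i (PySem.List.len nums) 1).foldl (pvBodyAArr nums k i) st) st).1.toList,
     (l.foldl (fun st i =>
        (PySem.List.pyRange i (PySem.List.len nums) 1).foldl (pvBodyAArr nums k i) st) st).2.toList.map
       Array.toList)
      = l.foldl (fun st i =>
          (PySem.List.pyRange i (PySem.List.len nums) 1).foldl (pvBodyA nums k i) st)
          (st.1.toList, st.2.toList.map Array.toList) := by
  intro l
  induction l with
  | nil => intro _ st; rfl
  | cons i l ih =>
    intro hl st
    rw [List.foldl_cons, List.foldl_cons]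
    have hi : 0 ≤ i := hl i (List.mem_cons_self ..)
    rw [← pvInner_bridge nums k i hk hi (PySem.List.pyRange i (PySem.List.len nums) 1)
        (fun x hx => (PySem.List.mem_pyRange_one.mp hx).1) st]
    exact ih (fun x hx => hl x (List.mem_cons_of_mem _ hx)) _

lemma pvA_bridge (nums : List Int) (k : Int) (hk : 1 ≤ k) :
    resultArray_v1 nums k
      = ((PySem.List.pyRange 0 (PySem.List.len nums) 1).foldl
          (fun st i => (PySem.List.pyRange i (PySem.List.len nums) 1).foldl (pvBodyA nums k i) st)
          (List.replicate k.toNat 0, List.replicate nums.length (List.replicate nums.length 1))).1 := by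
  rw [pvA_unfoldArr]
  have h := pvOuter_bridge nums k hk (PySem.List.pyRange 0 (PySem.List.len nums) 1)
    (fun x hx => (PySem.List.mem_pyRange_one.mp hx).1)
    (Array.replicate k.toNat 0, Array.replicate nums.length (Array.replicate nums.length 1))
  have h1 := congrArg Prod.fst h
  simp only at h1
  rw [h1, Array.toList_replicate, Array.toList_replicate, List.map_replicate,
      Array.toList_replicate]

lemma pvBumpFold_bridge : ∀ (ends : List Int), (∀ x ∈ ends, 0 ≤ x) → ∀ (a : Array Int),
    (ends.foldl pvBump a).toList = ends.foldl pvBumpL a.toList := by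
  intro ends
  induction ends with
  | nil => intro _ a; rfl
  | cons x l ih =>
    intro h a
    rw [List.foldl_cons, List.foldl_cons, ← pvBump_bridge a x (h x (List.mem_cons_self ..))]
    exact ih (fun y hy => h y (List.mem_cons_of_mem _ hy)) _

lemma pvB_bridgeFold (k : Int) (hk : 1 ≤ k) :
    ∀ (l : List Int) (a : Array Int) (es : List Int),
    ((l.foldl (pvBodyBArr k) (a, es)).1.toList, (l.foldl (pvBodyBArr k) (a, es)).2)
      = l.foldl (pvBodyB k) (a.toList, es) := by
  intro l
  induction l with
  | nil => intro a es; rfl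
  | cons v l ih =>
    intro a es
    rw [List.foldl_cons, List.foldl_cons]
    have hnn : ∀ x ∈ es.map (fun r => PySem.Int.mod (r * v) k) ++ [PySem.Int.mod v k], 0 ≤ x := by
      intro x hx
      rcases List.mem_append.mp hx with h | h
      · obtain ⟨r, _, rfl⟩ := List.mem_map.mp h
        exact PySem.Int.mod_nonneg _ (by omega)
      · rw [List.mem_singleton.mp h]
        exact PySem.Int.mod_nonneg _ (by omega)
    have hbody : pvBodyB k (a.toList, es) v
        = (((es.map (fun r => PySem.Int.mod (r * v) k) ++ [PySem.Int.mod v k]).foldl pvBump a).toList,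
           es.map (fun r => PySem.Int.mod (r * v) k) ++ [PySem.Int.mod v k]) := by
      simp only [pvBodyB]
      rw [pvBumpFold_bridge _ hnn a]
    rw [hbody]
    exact ih _ _

lemma pvB_bridge (nums : List Int) (k : Int) (hk : 1 ≤ k) :
    resultArray_v1_alt nums k
      = (nums.foldl (pvBodyB k) (List.replicate k.toNat 0, ([] : List Int))).1 := by
  rw [pvB_unfoldArr]
  have h := pvB_bridgeFold k hk nums (Array.replicate k.toNat 0) []
  have h1 := congrArg Prod.fst h
  simp only at h1
  rw [h1, Array.toList_replicate]

lemma pvA_eq (nums : List Int) (k : Int) (hk : 1 ≤ k) :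
    resultArray_v1 nums k
      = ((pvPairsA nums.length).map (pvRem nums k)).foldl pvBumpL (List.replicate k.toNat 0) := by
  rw [pvA_bridge nums k hk,
      pvOuterA nums k nums.length 0 _ _ le_rfl (by omega) (pvWf_init nums.length)]
  congr 1
  rw [pvPairsA, List.map_flatMap, Int.toNat_zero, ← List.range_eq_range']
  congr 1
  funext i
  rw [List.map_map]
  rfl

-- B side: the bucket indices B emits, from a list `ps` of pending (unreduced) products
def pvEmit (k : Int) (ps : List Int) : List Int → List Int
  | [] => []
  | v :: l => ((ps.map (· * v) ++ [v]).map (fun p => PySem.Int.mod p k))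
              ++ pvEmit k (ps.map (· * v) ++ [v]) l

lemma pvModMul (k a b : Int) (hk : 1 ≤ k) :
    PySem.Int.mod (PySem.Int.mod a k * b) k = PySem.Int.mod (a * b) k := by
  rw [PySem.Int.mod_eq_emod_of_pos (by omega), PySem.Int.mod_eq_emod_of_pos (by omega),
      PySem.Int.mod_eq_emod_of_pos (by omega)]
  conv_lhs => rw [Int.mul_emod]
  conv_rhs => rw [Int.mul_emod]
  rw [Int.emod_emod_of_dvd _ dvd_rfl]

lemma pvB_fold (k : Int) (hk : 1 ≤ k) (l : List Int) :
    ∀ (out : List Int) (ps : List Int),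
    ((l.foldl (pvBodyB k) (out, ps.map (fun p => PySem.Int.mod p k))).1)
      = (pvEmit k ps l).foldl pvBumpL out := by
  induction l with
  | nil => intro out ps; simp [pvEmit]
  | cons v l ih =>
    intro out ps
    rw [List.foldl_cons]
    have hends : (ps.map (fun p => PySem.Int.mod p k)).map (fun r => PySem.Int.mod (r * v) k)
          ++ [PySem.Int.mod v k]
        = ((ps.map (· * v)) ++ [v]).map (fun p => PySem.Int.mod p k) := by
      simp only [List.map_map, List.map_append, List.map_singleton]
      congr 1
      exact List.map_congr_left (fun p _ => pvModMul k p v hk)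
    have hbody : pvBodyB k (out, ps.map (fun p => PySem.Int.mod p k)) v
        = ((((ps.map (· * v)) ++ [v]).map (fun p => PySem.Int.mod p k)).foldl pvBumpL out,
           ((ps.map (· * v)) ++ [v]).map (fun p => PySem.Int.mod p k)) := by
      simp only [pvBodyB, hends]
    rw [hbody, ih _ (ps.map (· * v) ++ [v]), pvEmit, List.foldl_append]

lemma pvEmit_spec (nums : List Int) (k : Int) (c : Nat) :
    ∀ (m : Nat), m + c = nums.length →
    pvEmit k ((List.range m).map (fun i => pvP nums i m)) (nums.drop m)
      = (List.range' m c).flatMap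
          (fun e' => (List.range (e'+1)).map (fun i => pvRem nums k (i, e'+1))) := by
  induction c with
  | zero =>
    intro m hm
    rw [List.drop_of_length_le (by omega)]
    simp [pvEmit]
  | succ c ih =>
    intro m hm
    have hmlen : m < nums.length := by omega
    rw [List.drop_eq_getElem_cons hmlen, pvEmit]
    have hps : ((List.range m).map (fun i => pvP nums i m)).map (· * nums[m]) ++ [nums[m]]
        = (List.range (m+1)).map (fun i => pvP nums i (m+1)) := by
      rw [List.range_succ, List.map_append, List.map_map, List.map_singleton,
          pvP_single nums m hmlen]
      congr 1
      refine List.map_congr_left (fun i hi => ?_)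
      have : i < m := List.mem_range.mp hi
      exact (pvP_succ nums i m (by omega) hmlen).symm
    rw [hps, ih (m+1) (by omega), List.range'_succ, List.flatMap_cons]
    congr 1
    rw [List.map_map]
    rfl

lemma pvB_eq (nums : List Int) (k : Int) (hk : 1 ≤ k) :
    resultArray_v1_alt nums k
      = ((pvPairsB nums.length).map (pvRem nums k)).foldl pvBumpL (List.replicate k.toNat 0) := by
  rw [pvB_bridge nums k hk]
  have hspec := pvEmit_spec nums k nums.length 0 (by omega)
  simp only [List.range_zero, List.map_nil, List.drop_zero] at hspec
  rw [show (nums.foldl (pvBodyB k) (List.replicate k.toNat 0, ([] : List Int))).1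
        = (pvEmit k [] nums).foldl pvBumpL (List.replicate k.toNat 0)
      from pvB_fold k hk nums (List.replicate k.toNat 0) [], hspec]
  rw [pvPairsB, List.map_flatMap, ← List.range_eq_range']
  congr 1
  refine List.flatMap_congr (fun m _ => ?_)
  rw [List.map_map]
  rfl

-- the two enumerations of {(i,e) : i < e ≤ n} are permutations of each other
lemma pvFlatMap_append_perm {α β : Type} (l : List α) (f g : α → List β) :
    (l.flatMap (fun x => f x ++ g x)).Perm (l.flatMap f ++ l.flatMap g) := by
  induction l with
  | nil => simp
  | cons x l ih =>
    simp only [List.flatMap_cons]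
    refine (ih.append_left (f x ++ g x)).trans ?_
    rw [List.append_assoc, List.append_assoc]
    refine List.Perm.append_left (f x) ?_
    rw [← List.append_assoc (g x)]
    refine (List.Perm.append_right _ List.perm_append_comm).trans ?_
    rw [List.append_assoc]

lemma pvPairs_perm (n : Nat) : (pvPairsA n).Perm (pvPairsB n) := by
  induction n with
  | zero => simp [pvPairsA, pvPairsB]
  | succ n ih =>
    have hB : pvPairsB (n+1) = pvPairsB n ++ (List.range (n+1)).map (fun i => (i, n+1)) := by
      rw [pvPairsB]
      conv_lhs => rw [List.range_succ]
      rw [List.flatMap_append, List.flatMap_cons, List.flatMap_nil, List.append_nil]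
      rfl
    have hrow : ∀ i ∈ List.range n,
        (List.range' (i+1) (n+1-i)).map (fun e => (i, e))
          = (List.range' (i+1) (n-i)).map (fun e => (i, e)) ++ [(i, n+1)] := by
      intro i hi
      have hi' : i < n := List.mem_range.mp hi
      rw [show n+1-i = (n-i)+1 by omega, List.range'_concat, List.map_append,
          List.map_singleton]
      congr 3
      omega
    have hA : pvPairsA (n+1)
        = (List.range n).flatMap
            (fun i => (List.range' (i+1) (n-i)).map (fun e => (i, e)) ++ [(i, n+1)])
          ++ [(n, n+1)] := by
      rw [pvPairsA]
      conv_lhs => rw [List.range_succ]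
      rw [List.flatMap_append, List.flatMap_cons, List.flatMap_nil, List.append_nil]
      congr 1
      · exact List.flatMap_congr hrow
      · rw [show n+1-n = 1 by omega]
        simp
    rw [hA, hB, List.range_succ, List.map_append, List.map_singleton, ← List.append_assoc]
    refine List.Perm.append_right _ ?_
    refine (pvFlatMap_append_perm (List.range n) _ _).trans ?_
    have hsing : (List.range n).flatMap (fun i => ([(i, n+1)] : List (Nat × Nat)))
        = (List.range n).map (fun i => (i, n+1)) := by
      induction (List.range n) with
      | nil => rfl
      | cons a l ihl => rw [List.flatMap_cons, List.map_cons, ihl]; rfl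
    rw [hsing]
    exact ih.append_right _

-- ===== VERDICT (by name: the statement is the Claim_ definition above) =====
theorem resultArray_v1_spec : Claim_equal_resultArray_v1 := by
  intro nums k _hdom hpre
  unfold Spec_resultArray_v1
  rcases hpre with hk | rfl
  · rw [pvA_eq nums k hk, pvB_eq nums k hk]
    refine List.Perm.foldl_eq' ((pvPairs_perm nums.length).map (pvRem nums k)) ?_ _
    intro x hx y hy z
    obtain ⟨p, _, rfl⟩ := List.mem_map.mp hx
    obtain ⟨q, _, rfl⟩ := List.mem_map.mp hy
    exact pvBumpL_comm z _ _ (PySem.Int.mod_nonneg _ (by omega))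
      (PySem.Int.mod_nonneg _ (by omega))
  · rw [pvA_unfoldArr, pvB_unfoldArr]
    simp [PySem.List.pyRange_one_eq_nil]
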